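-- pv_equiv track=rewrite | github.com/Ian-au789/SSAFY_TIL_APS_basic | extra/종이자르기.py | largest_area
-- ===== SOURCE A (Python) =====
-- def largest_area (row, column, matrix):
--     row_cut = [0, row]
--     column_cut = [0, column]
--
--     for cut in matrix:
--         if cut[0] == 0:
--             row_cut.append(cut[1])
--         else:
--             column_cut.append(cut[1])
--
--     row_cut.sort()
--     column_cut.sort()
--     max_area = 0
--
--     for i in range(len(row_cut)-1):
--         for j in range(len(column_cut)-1):
--             area = (row_cut[i+1] - row_cut[i])*(column_cut[j+1]-column_cut[j])
--
--             if max_area < area: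
--                 max_area = area
--
--     return max_area
-- ===== SOURCE B (Python) =====
-- def largest_area(row, column, matrix):
--     rows = sorted([0, row] + [cut[1] for cut in matrix if cut[0] == 0])
--     cols = sorted([0, column] + [cut[1] for cut in matrix if cut[0] != 0])
--     max_r = max(b - a for a, b in zip(rows, rows[1:]))
--     max_c = max(b - a for a, b in zip(cols, cols[1:]))
--     return max_r * max_c
-- ===== Notes on version B (the rewrite author's own statement) =====
-- stated objective: alternative
-- what changed: Instead of scanning all row-gap/column-gap pairs in a nested loop to find the best product, B computes the maximum adjacent gap of each sorted cut axis independently and multiplies the two maxima (valid because gaps of a sorted list are nonnegative); the pairwise scan is O(R*C) while B is O(R+C) after sorting, though a timing run's inputs are one-sided so no speed-up was measured.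
import Mathlib
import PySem

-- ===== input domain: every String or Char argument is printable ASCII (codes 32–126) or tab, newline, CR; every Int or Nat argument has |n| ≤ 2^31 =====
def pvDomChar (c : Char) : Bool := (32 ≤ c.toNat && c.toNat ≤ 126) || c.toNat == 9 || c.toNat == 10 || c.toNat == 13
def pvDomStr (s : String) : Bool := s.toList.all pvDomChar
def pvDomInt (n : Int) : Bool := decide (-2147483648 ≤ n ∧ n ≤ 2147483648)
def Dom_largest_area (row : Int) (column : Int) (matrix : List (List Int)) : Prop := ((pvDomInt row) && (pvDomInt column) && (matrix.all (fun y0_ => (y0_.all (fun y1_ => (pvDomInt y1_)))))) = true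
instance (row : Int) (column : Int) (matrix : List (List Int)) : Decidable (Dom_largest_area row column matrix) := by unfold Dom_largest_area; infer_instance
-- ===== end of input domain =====

-- ===== PORT A =====
def largest_area (row : Int) (column : Int) (matrix : List (List Int)) : Int :=
  let p := matrix.foldl (fun (acc : List Int × List Int) cut =>
      if PySem.List.pyGetD cut 0 0 == 0 then (acc.1 ++ [PySem.List.pyGetD cut 1 0], acc.2)
      else (acc.1, acc.2 ++ [PySem.List.pyGetD cut 1 0])) ([0, row], [0, column])
  let row_cut := PySem.List.sorted p.1 (fun x => x) false
  let column_cut := PySem.List.sorted p.2 (fun x => x) false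
  (PySem.List.pyRange 0 (PySem.List.len row_cut - 1) 1).foldl (fun max_area i =>
    (PySem.List.pyRange 0 (PySem.List.len column_cut - 1) 1).foldl (fun ma j =>
      let area := (PySem.List.pyGetD row_cut (i+1) 0 - PySem.List.pyGetD row_cut i 0) *
                  (PySem.List.pyGetD column_cut (j+1) 0 - PySem.List.pyGetD column_cut j 0)
      if ma < area then area else ma) max_area) 0

-- ===== PORT B =====
-- max(b - a for a, b in zip(xs, xs[1:])) ; the [] case is unreachable on the lists B builds
def pvMaxGap (xs : List Int) : Int :=
  match (xs.zip xs.tail).map (fun q => q.2 - q.1) with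
  | [] => 0
  | d :: t => t.foldl max d

def largest_area_alt (row : Int) (column : Int) (matrix : List (List Int)) : Int :=
  let rows := PySem.List.sorted ([0, row] ++ (matrix.filter (fun cut => PySem.List.pyGetD cut 0 0 == 0)).map (fun cut => PySem.List.pyGetD cut 1 0)) (fun x => x) false
  let cols := PySem.List.sorted ([0, column] ++ (matrix.filter (fun cut => !(PySem.List.pyGetD cut 0 0 == 0))).map (fun cut => PySem.List.pyGetD cut 1 0)) (fun x => x) false
  pvMaxGap rows * pvMaxGap cols

-- ===== PRECONDITION & SPEC =====
-- Pre_ excludes matrices containing a cut of length < 2, on which Python A raises IndexError (cut[0]/cut[1]).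
def Pre_largest_area (row : Int) (column : Int) (matrix : List (List Int)) : Prop :=
  ∀ cut ∈ matrix, 2 ≤ cut.length
instance (row : Int) (column : Int) (matrix : List (List Int)) : Decidable (Pre_largest_area row column matrix) := by unfold Pre_largest_area; infer_instance
def pvWitness_largest_area : Int × Int × List (List Int) := (3, 4, [[0, 1], [1, 2]])
def Spec_largest_area (row : Int) (column : Int) (matrix : List (List Int)) (out : Int) : Prop := out = largest_area_alt row column matrix
instance (row : Int) (column : Int) (matrix : List (List Int)) (out : Int) : Decidable (Spec_largest_area row column matrix out) := by unfold Spec_largest_area; infer_instance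

-- ===== CLAIM (what is proved, stated in full; the proofs are below) =====
def Claim_equal_largest_area : Prop := ∀ (row : Int) (column : Int) (matrix : List (List Int)), Dom_largest_area row column matrix → Pre_largest_area row column matrix → Spec_largest_area row column matrix (largest_area row column matrix)

-- ===== LEMMAS AND PROOFS =====

-- helper used only by the proofs: the adjacent-gap list of xs (B's zip expression, named)
def pvGaps (xs : List Int) : List Int := (xs.zip xs.tail).map (fun q => q.2 - q.1)

lemma pvGaps_length (xs : List Int) : (pvGaps xs).length = xs.length - 1 := by
  simp [pvGaps]

lemma pvGaps_getD (xs : List Int) (k : Nat) (hk : k < xs.length - 1) :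
    (pvGaps xs).getD k 0 = xs.getD (k+1) 0 - xs.getD k 0 := by
  have h1 : k < (pvGaps xs).length := by rw [pvGaps_length]; omega
  have h2 : k + 1 < xs.length := by omega
  have h3 : k < xs.length := by omega
  have hz : k < (xs.zip xs.tail).length := by simp; omega
  simp [pvGaps, List.getD_eq_getElem?_getD, List.getElem?_eq_getElem hz,
        List.getElem?_eq_getElem h2, List.getElem?_eq_getElem h3,
        List.getElem_zip, List.getElem_tail]

lemma pvGaps_nonneg (xs : List Int) (h : xs.Pairwise (· ≤ ·)) :
    ∀ g ∈ pvGaps xs, 0 ≤ g := by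
  intro g hg
  simp only [pvGaps, List.mem_map] at hg
  obtain ⟨q, hq, rfl⟩ := hg
  obtain ⟨i, hi, rfl⟩ := List.mem_iff_getElem.1 hq
  have hi2 : i + 1 < xs.length := by
    have := hi; simp at this; omega
  rw [List.pairwise_iff_getElem] at h
  have := h i (i+1) (by omega) hi2 (by omega)
  simp [List.getElem_zip, List.getElem_tail]
  omega

-- A's two-accumulator append loop, split into the two filtered comprehensions
lemma foldl_pair_if {α : Type} (p : α → Bool) (f : α → Int) (l : List α) (acc1 acc2 : List Int) :
    l.foldl (fun (acc : List Int × List Int) x =>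
        if p x then (acc.1 ++ [f x], acc.2) else (acc.1, acc.2 ++ [f x])) (acc1, acc2)
    = (acc1 ++ (l.filter p).map f, acc2 ++ (l.filter (fun x => !p x)).map f) := by
  induction l generalizing acc1 acc2 with
  | nil => simp
  | cons a t ih => cases h : p a <;> simp [h, ih]

lemma pvMaxGap_cons (xs : List Int) (d : Int) (t : List Int) (h : pvGaps xs = d :: t) :
    pvMaxGap xs = t.foldl max d := by
  unfold pvMaxGap
  unfold pvGaps at h
  rw [h]

-- a fold over a list as a fold over its index range
lemma foldl_eq_foldl_range {α β : Type} [Inhabited α] (l : List α) (d : α) (F : β → α → β) (init : β) :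
    l.foldl F init = (List.range l.length).foldl (fun m k => F m (l.getD k d)) init := by
  have h : (List.range l.length).map (fun k => l.getD k d) = l := by
    apply List.ext_getElem
    · simp
    · intro i h1 h2
      simp [List.getD_eq_getElem?_getD, h2]
  conv_lhs => rw [← h]
  rw [List.foldl_map]

-- A's index loop 'for i in range(len(xs)-1): … xs[i+1]-xs[i] …' is a fold over the gap list
lemma fold_range_gaps (xs : List Int) (F : Int → Int → Int) (init : Int) :
    (PySem.List.pyRange 0 (PySem.List.len xs - 1) 1).foldl
      (fun m i => F m (PySem.List.pyGetD xs (i+1) 0 - PySem.List.pyGetD xs i 0)) init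
    = (pvGaps xs).foldl F init := by
  rw [PySem.List.len_eq, PySem.List.pyRange_one, List.foldl_map]
  have htn : ((xs.length : Int) - 1 - 0).toNat = xs.length - 1 := by omega
  rw [htn, foldl_eq_foldl_range (pvGaps xs) 0 F init, pvGaps_length]
  apply PySem.List.foldl_congr_mem
  intro m k hk
  have hk' : k < xs.length - 1 := List.mem_range.1 hk
  have e1 : (0 : Int) + (k : Int) + 1 = ((k + 1 : Nat) : Int) := by push_cast; ring
  have e2 : (0 : Int) + (k : Int) = ((k : Nat) : Int) := by ring
  rw [e1, e2, PySem.List.pyGetD_natCast, PySem.List.pyGetD_natCast, pvGaps_getD xs k hk']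

-- bounds for a running max of a projection
lemma foldl_max_proj_le {α : Type} (l : List α) (f : α → Int) (m B : Int)
    (hm : m ≤ B) (h : ∀ x ∈ l, f x ≤ B) :
    l.foldl (fun acc x => max acc (f x)) m ≤ B := by
  induction l generalizing m with
  | nil => exact hm
  | cons a t ih =>
    simp only [List.foldl_cons]
    exact ih _ (max_le hm (h a (by simp))) (fun x hx => h x (by simp [hx]))

-- the running-max update of A is Int.max
lemma ite_lt_eq_max (m a : Int) : (if m < a then a else m) = max m a := by omega

-- outer nested fold: lower bounds
lemma le_nested_fold (gr gc : List Int) (init : Int) :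
    init ≤ gr.foldl (fun m g => gc.foldl (fun m c => max m (g * c)) m) init := by
  induction gr generalizing init with
  | nil => simp
  | cons a t ih =>
    refine le_trans ?_ (ih _)
    exact (PySem.List.le_foldl_max_int gc (fun c => a * c) init).1

lemma prod_le_nested_fold (gr gc : List Int) (init g c : Int)
    (hg : g ∈ gr) (hc : c ∈ gc) :
    g * c ≤ gr.foldl (fun m g => gc.foldl (fun m c => max m (g * c)) m) init := by
  induction gr generalizing init with
  | nil => simp at hg
  | cons a t ih =>
    rcases List.mem_cons.1 hg with rfl | hg'
    · refine le_trans ?_ (le_nested_fold t gc _)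
      exact (PySem.List.le_foldl_max_int gc (fun c => g * c) init).2 c hc
    · exact ih _ hg'

lemma nested_fold_le (gr gc : List Int) (init B : Int) (hinit : init ≤ B)
    (h : ∀ g ∈ gr, ∀ c ∈ gc, g * c ≤ B) :
    gr.foldl (fun m g => gc.foldl (fun m c => max m (g * c)) m) init ≤ B := by
  induction gr generalizing init with
  | nil => exact hinit
  | cons a t ih =>
    simp only [List.foldl_cons]
    exact ih _ (foldl_max_proj_le gc (fun c => a * c) init B hinit (fun c hc => h a (by simp) c hc))
      (fun g hg c hc => h g (by simp [hg]) c hc)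

-- the key algorithmic fact: on nonnegative gap lists, the max over all products
-- (starting from 0) is the product of the maxima
lemma nested_max_eq (dr dc : Int) (tr tc : List Int)
    (h0r : ∀ g ∈ dr :: tr, 0 ≤ g) (h0c : ∀ c ∈ dc :: tc, 0 ≤ c) :
    (dr :: tr).foldl (fun m g => (dc :: tc).foldl (fun m c => max m (g * c)) m) 0
    = (tr.foldl max dr) * (tc.foldl max dc) := by
  set G := tr.foldl max dr with hGdef
  set C := tc.foldl max dc with hCdef
  have hGmem : G ∈ dr :: tr := by
    rcases PySem.List.foldl_max_mem tr dr with h | h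
    · rw [hGdef, h]; simp
    · simp [hGdef, List.mem_cons]; right; exact h
  have hCmem : C ∈ dc :: tc := by
    rcases PySem.List.foldl_max_mem tc dc with h | h
    · rw [hCdef, h]; simp
    · simp [hCdef, List.mem_cons]; right; exact h
  have hGub : ∀ g ∈ dr :: tr, g ≤ G := by
    intro g hg
    rcases List.mem_cons.1 hg with rfl | hg'
    · exact (PySem.List.le_foldl_max tr g).1
    · exact (PySem.List.le_foldl_max tr dr).2 g hg'
  have hCub : ∀ c ∈ dc :: tc, c ≤ C := by
    intro c hc
    rcases List.mem_cons.1 hc with rfl | hc'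
    · exact (PySem.List.le_foldl_max tc c).1
    · exact (PySem.List.le_foldl_max tc dc).2 c hc'
  have hG0 : 0 ≤ G := h0r G hGmem
  have hC0 : 0 ≤ C := h0c C hCmem
  apply le_antisymm
  · apply nested_fold_le
    · exact mul_nonneg hG0 hC0
    · intro g hg c hc
      exact mul_le_mul (hGub g hg) (hCub c hc) (h0c c hc) hG0
  · exact prod_le_nested_fold _ _ _ _ _ hGmem hCmem

-- ===== VERDICT (by name: the statement is the Claim_ definition above) =====
theorem largest_area_spec : Claim_equal_largest_area := by
  intro row column matrix _ _
  unfold Spec_largest_area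
  simp only [largest_area, largest_area_alt]
  rw [foldl_pair_if (fun cut => PySem.List.pyGetD cut 0 0 == 0)
        (fun cut => PySem.List.pyGetD cut 1 0) matrix [0, row] [0, column]]
  set rs := PySem.List.sorted ([0, row] ++ (matrix.filter (fun cut => PySem.List.pyGetD cut 0 0 == 0)).map (fun cut => PySem.List.pyGetD cut 1 0)) (fun x => x) false with hrs
  set cs := PySem.List.sorted ([0, column] ++ (matrix.filter (fun cut => !(PySem.List.pyGetD cut 0 0 == 0))).map (fun cut => PySem.List.pyGetD cut 1 0)) (fun x => x) false with hcs
  -- the sorted lists are ≤-ordered and of length ≥ 2, so the gap lists are nonempty and nonnegative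
  have hrslen : 2 ≤ rs.length := by rw [hrs, PySem.List.length_sorted]; simp
  have hcslen : 2 ≤ cs.length := by rw [hcs, PySem.List.length_sorted]; simp
  have hrssort : rs.Pairwise (· ≤ ·) := PySem.List.sorted_pairwise _ (fun x => x)
  have hcssort : cs.Pairwise (· ≤ ·) := PySem.List.sorted_pairwise _ (fun x => x)
  -- rewrite A's nested index loop as a nested fold over the two gap lists
  rw [fold_range_gaps rs
        (fun m g => (PySem.List.pyRange 0 (PySem.List.len cs - 1) 1).foldl
          (fun ma j => if ma < g * (PySem.List.pyGetD cs (j+1) 0 - PySem.List.pyGetD cs j 0)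
                       then g * (PySem.List.pyGetD cs (j+1) 0 - PySem.List.pyGetD cs j 0) else ma) m) 0]
  have inner_eq : ∀ g m : Int,
      (PySem.List.pyRange 0 (PySem.List.len cs - 1) 1).foldl
        (fun ma j => if ma < g * (PySem.List.pyGetD cs (j+1) 0 - PySem.List.pyGetD cs j 0)
                     then g * (PySem.List.pyGetD cs (j+1) 0 - PySem.List.pyGetD cs j 0) else ma) m
      = (pvGaps cs).foldl (fun ma c => max ma (g * c)) m := by
    intro g m
    rw [fold_range_gaps cs (fun ma c => if ma < g * c then g * c else ma) m]
    exact PySem.List.foldl_congr_mem _ _ _ _ (fun ma c _ => ite_lt_eq_max ma (g * c))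
  rw [PySem.List.foldl_congr_mem (pvGaps rs) _
        (fun m g => (pvGaps cs).foldl (fun ma c => max ma (g * c)) m) 0
        (fun m g _ => inner_eq g m)]
  -- the gap lists are nonempty; apply the max-product lemma
  have hgr : (pvGaps rs).length = rs.length - 1 := pvGaps_length rs
  have hgc : (pvGaps cs).length = cs.length - 1 := pvGaps_length cs
  obtain ⟨dr, tr, hdr⟩ : ∃ d t, pvGaps rs = d :: t := by
    cases h : pvGaps rs with
    | nil => rw [h] at hgr; simp at hgr; omega
    | cons d t => exact ⟨d, t, rfl⟩
  obtain ⟨dc, tc, hdc⟩ : ∃ d t, pvGaps cs = d :: t := by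
    cases h : pvGaps cs with
    | nil => rw [h] at hgc; simp at hgc; omega
    | cons d t => exact ⟨d, t, rfl⟩
  have h0r : ∀ g ∈ dr :: tr, 0 ≤ g := by rw [← hdr]; exact pvGaps_nonneg rs hrssort
  have h0c : ∀ c ∈ dc :: tc, 0 ≤ c := by rw [← hdc]; exact pvGaps_nonneg cs hcssort
  rw [hdr, hdc, nested_max_eq dr dc tr tc h0r h0c,
      pvMaxGap_cons rs dr tr hdr, pvMaxGap_cons cs dc tc hdc]
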